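-- pv_equiv track=rewrite | github.com/neozeno/programacion-en-python-uniandes | 01-programacion-en-python/M3/retos/encontrar_mayor.py | encontrar_mayor
-- ===== SOURCE A (Python) =====
-- def encontrar_mayor(entrada: list[int]) -> int:
--     """
--     Itera sobre una lista de enteros positivos y retorna el numero mayor.
--
--     Parámetros:
--         entrada (list[int]): Lista en la que se buscará el número.
--
--     Retorna:
--         int: Numero mayor, o -1 si la lista esta vacia.
--
--     Raise:
--         ValueError: si la lista contiene algun numero negativo.
--
--     Ejemplos:
--         >>> buscar_elemento([1, 2, 3, 4])
--         4
--         >>> buscar_elemento([])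
--         -1
--     """
--     if len(entrada) == 0:
--         return -1
--
--     for numero in entrada:
--         if numero < 0:
--             raise ValueError(
--                 f"La lista solo debe contener numeros positivos. Se encontro {numero}"
--             )
--
--     numero_mayor = entrada[0]
--     for numero in entrada:
--         if numero > numero_mayor:
--             numero_mayor = numero
--
--     return numero_mayor
-- ===== SOURCE B (Python) =====
-- def encontrar_mayor(entrada: list[int]) -> int:
--     if not entrada:
--         return -1
--     return _mayor_dc(entrada)
--
--
-- def _mayor_dc(seg: list[int]) -> int:
--     # Divide-and-conquer maximum; validates at the leaves, visiting them
--     # left to right so the leftmost negative raises first (as in A).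
--     if len(seg) == 1:
--         n = seg[0]
--         if n < 0:
--             raise ValueError(
--                 f"La lista solo debe contener numeros positivos. Se encontro {n}"
--             )
--         return n
--     mid = len(seg) // 2
--     izq = _mayor_dc(seg[:mid])
--     der = _mayor_dc(seg[mid:])
--     return izq if izq > der else der
-- ===== Notes on version B (the rewrite author's own statement) =====
-- stated objective: alternative
-- what changed: Replaces A's two sequential linear loops (negative-validation pass, then running-maximum pass) with a divide-and-conquer recursion that splits the list in halves and validates single elements at the leaves, visited left to right.
import Mathlib
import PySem

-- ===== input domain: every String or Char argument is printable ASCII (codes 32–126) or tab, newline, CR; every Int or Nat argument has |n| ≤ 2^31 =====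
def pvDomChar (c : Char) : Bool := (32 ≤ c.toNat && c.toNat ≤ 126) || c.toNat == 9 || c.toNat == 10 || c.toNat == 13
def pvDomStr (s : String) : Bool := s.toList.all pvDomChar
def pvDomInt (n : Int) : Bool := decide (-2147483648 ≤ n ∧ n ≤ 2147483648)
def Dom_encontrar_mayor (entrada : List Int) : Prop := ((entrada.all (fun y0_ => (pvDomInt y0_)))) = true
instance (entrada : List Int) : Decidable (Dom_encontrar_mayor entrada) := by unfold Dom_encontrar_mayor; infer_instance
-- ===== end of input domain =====

-- B replaces A's two sequential linear loops with a divide-and-conquer maximum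
-- recursion (objective: alternative algorithm, not faster).

-- ===== PORT A =====
-- Port of A: empty check, validation pass (raise path excluded by Pre_, returns 0 there),
-- then the running-maximum loop started at entrada[0].
def encontrar_mayor (entrada : List Int) : Int :=
  if entrada.length = 0 then -1
  else if entrada.any (fun numero => numero < 0) then 0  -- ValueError; outside Pre_
  else
    entrada.foldl (fun numero_mayor numero => if numero > numero_mayor then numero else numero_mayor)
      ((PySem.List.pyGet? entrada 0).getD 0)

-- ===== PORT B =====
-- Port of B's helper _mayor_dc: divide-and-conquer maximum, validating at the leaves.
-- The ValueError path is excluded by Pre_; the port returns 0 there.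
-- Python only ever calls it on nonempty slices; the [] case is unreachable.
def mayor_dc : List Int → Int
  | [] => 0
  | [n] => if n < 0 then 0 else n  -- ValueError; outside Pre_
  | a :: b :: t =>
      let seg := a :: b :: t
      let mid := seg.length / 2
      let izq := mayor_dc (seg.take mid)
      let der := mayor_dc (seg.drop mid)
      if izq > der then izq else der
termination_by l => l.length
decreasing_by
  · simp [List.length_take]; omega
  · simp; omega

def encontrar_mayor_alt (entrada : List Int) : Int :=
  match entrada with
  | [] => -1
  | _ => mayor_dc entrada

-- ===== PRECONDITION & SPEC =====
-- Pre_ excludes exactly the inputs containing a negative number, on which A raises ValueError.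
def Pre_encontrar_mayor (entrada : List Int) : Prop := ∀ x ∈ entrada, 0 ≤ x
instance (entrada : List Int) : Decidable (Pre_encontrar_mayor entrada) := by
  unfold Pre_encontrar_mayor; infer_instance
def pvWitness_encontrar_mayor : List Int := [1, 2, 3, 4]
def Spec_encontrar_mayor (entrada : List Int) (out : Int) : Prop := out = encontrar_mayor_alt entrada
instance (entrada : List Int) (out : Int) : Decidable (Spec_encontrar_mayor entrada out) := by unfold Spec_encontrar_mayor; infer_instance

-- ===== CLAIM (what is proved, stated in full; the proofs are below) =====
def Claim_equal_encontrar_mayor : Prop := ∀ (entrada : List Int), Dom_encontrar_mayor entrada → Pre_encontrar_mayor entrada → Spec_encontrar_mayor entrada (encontrar_mayor entrada)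

-- ===== LEMMAS AND PROOFS =====
theorem pv_foldl_max (l : List Int) (a : Int) :
    l.foldl (fun numero_mayor numero => if numero > numero_mayor then numero else numero_mayor) a
      = l.foldl max a := by
  induction l generalizing a with
  | nil => rfl
  | cons h t ih =>
    simp only [List.foldl_cons, ih]
    congr 1
    by_cases hc : h > a
    · simp [hc, max_eq_right (le_of_lt hc)]
    · simp [hc, max_eq_left (not_lt.mp hc)]

theorem pv_foldl_max_max (l : List Int) (c b : Int) :
    List.foldl max (max c b) l = max c (List.foldl max b l) := by
  induction l generalizing b with
  | nil => rfl
  | cons d ds ih => simp only [List.foldl_cons, max_assoc, ih]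

theorem pv_max?_append (l₁ l₂ : List Int) (h₁ : l₁ ≠ []) (h₂ : l₂ ≠ []) :
    ((l₁ ++ l₂).max?).getD 0 = max ((l₁.max?).getD 0) ((l₂.max?).getD 0) := by
  match l₁, l₂ with
  | a :: as, b :: bs =>
    simp only [List.cons_append, List.max?_cons', Option.getD_some, List.foldl_append]
    rw [List.foldl_cons, pv_foldl_max_max]

theorem pv_mayor_dc_eq (l : List Int) (hne : l ≠ []) (hpos : ∀ x ∈ l, (0:Int) ≤ x) :
    mayor_dc l = (l.max?).getD 0 := by
  match l with
  | [n] =>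
    have : (0:Int) ≤ n := hpos n (by simp)
    simp [mayor_dc, not_lt.mpr this]
  | a :: b :: t =>
    rw [mayor_dc]
    have hlen : (a :: b :: t).length = t.length + 2 := by simp
    have hmid1 : 1 ≤ (a :: b :: t).length / 2 := by omega
    have hmid2 : (a :: b :: t).length / 2 < (a :: b :: t).length := by omega
    have htne : (a :: b :: t).take ((a :: b :: t).length / 2) ≠ [] := by
      apply List.ne_nil_of_length_pos
      simp only [List.length_take]
      omega
    have hdne : (a :: b :: t).drop ((a :: b :: t).length / 2) ≠ [] := by
      apply List.ne_nil_of_length_pos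
      simp; omega
    have ih₁ := pv_mayor_dc_eq ((a :: b :: t).take ((a :: b :: t).length / 2)) htne
      (fun x hx => hpos x (List.mem_of_mem_take hx))
    have ih₂ := pv_mayor_dc_eq ((a :: b :: t).drop ((a :: b :: t).length / 2)) hdne
      (fun x hx => hpos x (List.mem_of_mem_drop hx))
    simp only [ih₁, ih₂]
    have hif : ∀ p q : Int, (if p > q then p else q) = max p q := by
      intro p q; rw [max_def]; split_ifs <;> omega
    rw [hif, ← pv_max?_append _ _ htne hdne, List.take_append_drop]
termination_by l.length
decreasing_by
  · simp [List.length_take]; omega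
  · simp; omega

-- ===== VERDICT (by name: the statement is the Claim_ definition above) =====
theorem encontrar_mayor_spec : Claim_equal_encontrar_mayor := by
  intro entrada _ hpre
  unfold Spec_encontrar_mayor
  match entrada with
  | [] => rfl
  | x :: t =>
    have hany : (x :: t).any (fun numero => decide (numero < 0)) = false := by
      simp only [List.any_eq_false, decide_eq_true_eq]
      intro y hy
      exact not_lt.mpr (hpre y hy)
    unfold encontrar_mayor encontrar_mayor_alt
    simp only [List.length_cons]
    rw [if_neg (by omega), if_neg (by simp [hany]),
      pv_mayor_dc_eq (x :: t) (by simp) hpre]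
    rw [List.max?_cons', Option.getD_some]
    simp [pv_foldl_max, PySem.List.pyGet?, PySem.List.pyIdx?]
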